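-- pv_equiv track=rewrite | github.com/Harry-Pootha/aoc2025 | day03/day03.py | remove_lowest_number
-- ===== SOURCE A (Python) =====
-- def remove_lowest_number(numbers: list[int], limit: int) -> list[int]:
--     return_list: list[int] = numbers.copy()
--     length = len(return_list)
--
--     for smallest in range(0, 10):
--         for position in range(length - 1, -1, -1): # what a stupid looking range
--             number = return_list[position]
--             if number == smallest:
--                 return_list.pop(position)
--                 length -= 1
--                 if length <= limit:
--                     return return_list
--
--     return return_list
-- ===== SOURCE B (Python) =====
-- def remove_lowest_number(numbers: list[int], limit: int) -> list[int]:
--     # number of removals: at least one digit is always removed if present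
--     need = len(numbers) - limit
--     if need < 1:
--         need = 1
--     counts = [numbers.count(v) for v in range(10)]
--     keep = []
--     for c in counts:
--         take = c if c < need else need
--         keep.append(c - take)
--         need -= take
--     out = []
--     for x in numbers:
--         if 0 <= x <= 9:
--             if keep[x] > 0:
--                 keep[x] -= 1
--                 out.append(x)
--         else:
--             out.append(x)
--     return out
-- ===== Notes on version B (the rewrite author's own statement) =====
-- stated objective: alternative
-- what changed: A repeatedly scans the list right-to-left for each digit value 0-9 and pops elements one at a time until the length is within the limit; B computes the number of removals once (at least one, matching A), tallies digit occurrences, derives a per-value keep budget, and builds the result in a single filtering pass.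
import Mathlib
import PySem

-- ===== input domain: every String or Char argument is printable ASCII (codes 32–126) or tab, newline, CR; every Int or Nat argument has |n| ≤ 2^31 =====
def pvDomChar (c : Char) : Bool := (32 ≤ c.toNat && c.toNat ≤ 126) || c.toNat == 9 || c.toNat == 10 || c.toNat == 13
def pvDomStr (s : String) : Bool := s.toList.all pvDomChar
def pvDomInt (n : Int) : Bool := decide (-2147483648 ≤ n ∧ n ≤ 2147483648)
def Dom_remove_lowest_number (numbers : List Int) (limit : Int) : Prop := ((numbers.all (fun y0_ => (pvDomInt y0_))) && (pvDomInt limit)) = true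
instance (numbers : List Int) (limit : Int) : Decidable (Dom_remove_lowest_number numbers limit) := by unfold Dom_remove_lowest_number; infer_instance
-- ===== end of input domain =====

-- B replaces A's ten right-to-left pop scans by one counting pass (digit tallies → per-value keep
-- budgets → a single filtering pass); same return value on every input.

-- ===== PORT A =====
-- inner 'for position in range(length-1, -1, -1)' loop; early return = Sum.inr
def pvAInner (smallest limit : Int) (positions : List Int) (lst : List Int) (length : Int) :
    (List Int × Int) ⊕ List Int :=
  match positions with
  | [] => Sum.inl (lst, length)
  | p :: rest =>
    -- return_list[position]: index is always in range on A's executions, so the default is never used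
    let number := (PySem.List.pyGet? lst p).getD 0
    if number = smallest then
      let lst' := ((PySem.List.pop? lst p).map Prod.snd).getD lst
      let length' := length - 1
      if length' ≤ limit then Sum.inr lst'
      else pvAInner smallest limit rest lst' length'
    else pvAInner smallest limit rest lst length

-- outer 'for smallest in range(0, 10)' loop
def pvAOuter (limit : Int) (smallests : List Int) (lst : List Int) (length : Int) : List Int :=
  match smallests with
  | [] => lst
  | s :: rest =>
    match pvAInner s limit (PySem.List.pyRange (length - 1) (-1) (-1)) lst length with
    | Sum.inr r => r
    | Sum.inl (lst', length') => pvAOuter limit rest lst' length'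

def remove_lowest_number (numbers : List Int) (limit : Int) : List Int :=
  pvAOuter limit (PySem.List.pyRange 0 10 1) numbers (numbers.length : Int)

-- ===== PORT B =====
-- 'for c in counts: take = …; keep.append(c - take); need -= take'
def pvBKeep (need : Int) (counts : List Int) (keep : List Int) : List Int :=
  match counts with
  | [] => keep
  | c :: rest =>
    let take := if c < need then c else need
    pvBKeep (need - take) rest (keep ++ [c - take])

-- 'for x in numbers: …' final filtering pass; keep[x] lookups are always in range (0 ≤ x ≤ 9, len keep = 10)
def pvBPass (keep : List Int) (xs : List Int) (out : List Int) : List Int :=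
  match xs with
  | [] => out
  | x :: rest =>
    if 0 ≤ x ∧ x ≤ 9 then
      if PySem.List.pyGetD keep x 0 > 0 then
        pvBPass (PySem.List.pySetD keep x (PySem.List.pyGetD keep x 0 - 1)) rest (out ++ [x])
      else pvBPass keep rest out
    else pvBPass keep rest (out ++ [x])

def remove_lowest_number_alt (numbers : List Int) (limit : Int) : List Int :=
  let need0 := (numbers.length : Int) - limit
  let need := if need0 < 1 then 1 else need0
  let counts := (PySem.List.pyRange 0 10 1).map (fun v => (PySem.List.count numbers v : Int))
  let keep := pvBKeep need counts []
  pvBPass keep numbers []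

-- ===== PRECONDITION & SPEC =====
-- A is total (every index it touches is in range), so there is no Pre_.
def Spec_remove_lowest_number (numbers : List Int) (limit : Int) (out : List Int) : Prop :=
  out = remove_lowest_number_alt numbers limit
instance (numbers : List Int) (limit : Int) (out : List Int) : Decidable (Spec_remove_lowest_number numbers limit out) := by
  unfold Spec_remove_lowest_number; infer_instance

-- ===== CLAIM (what is proved, stated in full; the proofs are below) =====
def Claim_equal_remove_lowest_number : Prop := ∀ (numbers : List Int) (limit : Int), Dom_remove_lowest_number numbers limit → Spec_remove_lowest_number numbers limit (remove_lowest_number numbers limit)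

-- ===== LEMMAS AND PROOFS =====

-- integer-valued count
def pvCnt (v : Int) (l : List Int) : Int := (l.count v : Int)

-- keep the first m occurrences of v, drop the rest (spec-level)
def pvKL (v m : Int) : List Int → List Int
  | [] => []
  | x :: xs => if x = v then (if 0 < m then x :: pvKL v (m - 1) xs else pvKL v m xs)
               else x :: pvKL v m xs

-- pointwise function update
def pvUpd (k : Int → Int) (v m : Int) : Int → Int := fun w => if w = v then m else k w

-- multi-value keep: budgets k, keep first (k x) occurrences of each digit x, everything else verbatim
def pvMK (k : Int → Int) : List Int → List Int
  | [] => []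
  | x :: xs => if 0 ≤ x ∧ x ≤ 9 then
                 (if 0 < k x then x :: pvMK (pvUpd k x (k x - 1)) xs else pvMK k xs)
               else x :: pvMK k xs

-- greedy final budgets (mirrors B's keep computation, value-indexed)
def pvGK (vals : List Int) (need : Int) (k : Int → Int) (l : List Int) : Int → Int :=
  match vals with
  | [] => k
  | v :: rest =>
    let c := pvCnt v l
    let take := if c < need then c else need
    pvGK rest (need - take) (pvUpd k v (c - take)) l

lemma pvCnt_nonneg (v : Int) (l : List Int) : 0 ≤ pvCnt v l := by simp [pvCnt]
lemma pvCnt_cons (v x : Int) (xs : List Int) :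
    pvCnt v (x :: xs) = pvCnt v xs + (if x = v then 1 else 0) := by
  by_cases h : x = v <;> simp [pvCnt, List.count_cons, h]

lemma pvKL_id (v m : Int) (l : List Int) (h : pvCnt v l ≤ m) : pvKL v m l = l := by
  induction l generalizing m with
  | nil => rfl
  | cons x xs ih =>
    rw [pvCnt_cons] at h
    by_cases hx : x = v
    · rw [if_pos hx] at h
      have hm : 0 < m := by have := pvCnt_nonneg v xs; omega
      simp only [pvKL, if_pos hx, if_pos hm]
      rw [ih (m - 1) (by omega)]
    · rw [if_neg hx] at h
      simp only [pvKL, if_neg hx]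
      rw [ih m (by omega)]

lemma pvKL_append_single (v m x : Int) (l : List Int) :
    pvKL v m (l ++ [x]) = if x = v then (if pvCnt v l < m then pvKL v m l ++ [x] else pvKL v m l)
                          else pvKL v m l ++ [x] := by
  induction l generalizing m with
  | nil =>
    by_cases hx : x = v
    · by_cases hm : 0 < m <;> simp [pvKL, pvCnt, hx, hm]
    · simp [pvKL, hx]
  | cons y ys ih =>
    rw [List.cons_append]
    by_cases hy : y = v
    · by_cases hm : 0 < m
      · simp only [pvKL, if_pos hy, if_pos hm, ih (m - 1)]
        rw [pvCnt_cons, if_pos hy]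
        by_cases hx : x = v
        · rw [if_pos hx, if_pos hx]
          have hc := pvCnt_nonneg v ys
          by_cases h2 : pvCnt v ys < m - 1
          · rw [if_pos h2, if_pos (by omega : pvCnt v ys + 1 < m), List.cons_append]
          · rw [if_neg h2, if_neg (by omega : ¬ pvCnt v ys + 1 < m)]
        · rw [if_neg hx, if_neg hx, List.cons_append]
      · simp only [pvKL, if_pos hy, if_neg hm, ih m]
        rw [pvCnt_cons, if_pos hy]
        have hc := pvCnt_nonneg v ys
        by_cases hx : x = v
        · rw [if_pos hx, if_pos hx, if_neg (by omega : ¬ pvCnt v ys < m),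
            if_neg (by omega : ¬ pvCnt v ys + 1 < m)]
        · rw [if_neg hx, if_neg hx]
    · simp only [pvKL, if_neg hy, ih m]
      rw [pvCnt_cons, if_neg hy, add_zero]
      by_cases hx : x = v
      · rw [if_pos hx, if_pos hx]
        by_cases h2 : pvCnt v ys < m
        · rw [if_pos h2, if_pos h2, List.cons_append]
        · rw [if_neg h2, if_neg h2]
      · rw [if_neg hx, if_neg hx, List.cons_append]

lemma pvKL_zero_length (v : Int) (l : List Int) :
    ((pvKL v 0 l).length : Int) = (l.length : Int) - pvCnt v l := by
  induction l with
  | nil => simp [pvKL, pvCnt]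
  | cons x xs ih =>
    rw [pvCnt_cons]
    by_cases hx : x = v
    · simp only [pvKL, if_pos hx, if_neg (by omega : ¬ (0:Int) < 0), if_pos hx,
        List.length_cons]
      rw [ih]; push_cast; omega
    · simp only [pvKL, if_neg hx, if_neg hx, List.length_cons]
      push_cast
      push_cast at ih
      omega

lemma pvMK_congr (k k' : Int → Int) (l : List Int) (h : ∀ w, 0 ≤ w → w ≤ 9 → k w = k' w) :
    pvMK k l = pvMK k' l := by
  induction l generalizing k k' with
  | nil => rfl
  | cons x xs ih =>
    by_cases hd : 0 ≤ x ∧ x ≤ 9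
    · have hk : k x = k' x := h x hd.1 hd.2
      by_cases hm : 0 < k x
      · simp only [pvMK, if_pos hd, if_pos hm, if_pos (hk ▸ hm)]
        refine congrArg (x :: ·) ?_
        rw [ih _ _ (fun w h1 h2 => ?_)]
        simp only [pvUpd]
        split_ifs with he
        · rw [hk]
        · exact h w h1 h2
      · simp only [pvMK, if_pos hd, if_neg hm, if_neg (hk ▸ hm)]
        exact ih _ _ h
    · simp only [pvMK, if_neg hd]
      rw [ih _ _ h]

lemma pvMK_id (k : Int → Int) (l : List Int) (h : ∀ x ∈ l, 0 ≤ x → x ≤ 9 → pvCnt x l ≤ k x) :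
    pvMK k l = l := by
  induction l generalizing k with
  | nil => rfl
  | cons x xs ih =>
    by_cases hd : 0 ≤ x ∧ x ≤ 9
    · have hx : pvCnt x (x :: xs) ≤ k x := h x (by simp) hd.1 hd.2
      rw [pvCnt_cons, if_pos rfl] at hx
      have hm : 0 < k x := by have := pvCnt_nonneg x xs; omega
      simp only [pvMK, if_pos hd, if_pos hm]
      rw [ih _ (fun y hy hy1 hy2 => ?_)]
      have hyc := h y (by simp [hy]) hy1 hy2
      rw [pvCnt_cons] at hyc
      by_cases hyx : y = x
      · subst hyx
        rw [if_pos rfl] at hyc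
        simp only [pvUpd, if_pos rfl]
        omega
      · rw [if_neg (fun e => hyx e.symm)] at hyc
        simp only [pvUpd, if_neg hyx]
        omega
    · simp only [pvMK, if_neg hd]
      rw [ih _ (fun y hy hy1 hy2 => ?_)]
      have hyc := h y (by simp [hy]) hy1 hy2
      have hne : ¬ x = y := fun he => hd (he ▸ ⟨hy1, hy2⟩)
      rw [pvCnt_cons, if_neg hne, add_zero] at hyc
      exact hyc

lemma pvMK_count_full (k : Int → Int) (v : Int) (l : List Int) (h : pvCnt v l ≤ k v) :
    pvCnt v (pvMK k l) = pvCnt v l := by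
  induction l generalizing k with
  | nil => rfl
  | cons x xs ih =>
    rw [pvCnt_cons] at h
    by_cases hd : 0 ≤ x ∧ x ≤ 9
    · by_cases hm : 0 < k x
      · simp only [pvMK, if_pos hd, if_pos hm]
        rw [pvCnt_cons, pvCnt_cons]
        by_cases hxv : x = v
        · rw [if_pos hxv] at h ⊢
          rw [ih _ (by subst hxv; simp only [pvUpd, if_pos rfl]; omega)]
        · rw [if_neg hxv] at h ⊢
          rw [ih _ (by simp only [pvUpd]; rw [if_neg (fun e => hxv e.symm)]; omega)]
      · have hxv : ¬ x = v := by
          intro he; subst he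
          have := pvCnt_nonneg x xs; rw [if_pos rfl] at h; omega
        rw [if_neg hxv, add_zero] at h
        simp only [pvMK, if_pos hd, if_neg hm]
        rw [ih _ h, pvCnt_cons, if_neg hxv, add_zero]
    · simp only [pvMK, if_neg hd]
      rw [pvCnt_cons, pvCnt_cons]
      by_cases hxv : x = v
      · rw [if_pos hxv] at h ⊢
        rw [ih _ (by omega)]
      · rw [if_neg hxv] at h ⊢
        rw [ih _ (by omega)]

lemma pvLK (k : Int → Int) (v m : Int) (l : List Int) (hd : 0 ≤ v ∧ v ≤ 9) (h : pvCnt v l ≤ k v) :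
    pvKL v m (pvMK k l) = pvMK (pvUpd k v m) l := by
  induction l generalizing k m with
  | nil => rfl
  | cons x xs ih =>
    rw [pvCnt_cons] at h
    by_cases hxd : 0 ≤ x ∧ x ≤ 9
    · by_cases hx : x = v
      · subst hx
        rw [if_pos rfl] at h
        have hm : 0 < k x := by have := pvCnt_nonneg x xs; omega
        have hupd : pvUpd k x m x = m := by simp [pvUpd]
        by_cases hmm : 0 < m
        · simp only [pvMK, if_pos hxd, if_pos hm, pvKL, if_pos rfl, if_pos hmm, hupd,
            if_pos hmm]
          rw [ih _ _ (by simp only [pvUpd, if_pos rfl]; omega)]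
          refine congrArg (x :: ·) (pvMK_congr _ _ _ (fun w h1 h2 => ?_))
          simp only [pvUpd]
          split_ifs <;> rfl
        · simp only [pvMK, if_pos hxd, if_pos hm, pvKL, if_pos rfl, if_neg hmm, hupd,
            if_neg hmm]
          rw [ih _ _ (by simp only [pvUpd, if_pos rfl]; omega)]
          refine pvMK_congr _ _ _ (fun w h1 h2 => ?_)
          simp only [pvUpd]
          split_ifs <;> rfl
      · rw [if_neg hx, add_zero] at h
        have hupdx : pvUpd k v m x = k x := by simp [pvUpd, hx]
        by_cases hm : 0 < k x
        · simp only [pvMK, if_pos hxd, if_pos hm, hupdx, pvKL, if_neg hx]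
          rw [ih _ _ (by simp only [pvUpd]; rw [if_neg (fun e => hx e.symm)]; omega)]
          refine congrArg (x :: ·) (pvMK_congr _ _ _ (fun w h1 h2 => ?_))
          simp only [pvUpd]
          split_ifs <;> simp_all
        · simp only [pvMK, if_pos hxd, if_neg hm, hupdx, if_neg hm]
          exact ih _ _ h
    · have hx : ¬ x = v := fun he => hxd (he ▸ hd)
      rw [if_neg hx, add_zero] at h
      simp only [pvMK, if_neg hxd, pvKL, if_neg hx]
      rw [ih _ _ h]

lemma pvGK_ne (vals : List Int) (need : Int) (k : Int → Int) (l : List Int) (w : Int) (h : w ∉ vals) :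
    pvGK vals need k l w = k w := by
  induction vals generalizing need k with
  | nil => rfl
  | cons v rest ih =>
    simp only [List.mem_cons, not_or] at h
    simp only [pvGK]
    rw [ih _ _ h.2]
    simp [pvUpd, h.1]

lemma pvErase_mid (x : Int) (ys zs : List Int) :
    (ys ++ x :: zs).eraseIdx ys.length = ys ++ zs := by
  induction ys with
  | nil => rfl
  | cons y ys ih => simpa [List.eraseIdx] using ih


lemma pvCnt_append_single (v x : Int) (l : List Int) :
    pvCnt v (l ++ [x]) = pvCnt v l + (if x = v then 1 else 0) := by
  by_cases h : x = v <;> simp [pvCnt, List.count_append, h]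

lemma pvInner_bridge (s limit : Int) (init suffix : List Int)
    (hq : 1 ≤ (init.length : Int) + (suffix.length : Int) - limit) :
    pvAInner s limit (PySem.List.pyRange ((init.length : Int) - 1) (-1) (-1)) (init ++ suffix)
        ((init.length : Int) + (suffix.length : Int)) =
      (if (init.length : Int) + (suffix.length : Int) - limit ≤ pvCnt s init then
        Sum.inr (pvKL s (pvCnt s init - ((init.length : Int) + (suffix.length : Int) - limit)) init ++ suffix)
      else
        Sum.inl (pvKL s 0 init ++ suffix, (init.length : Int) + (suffix.length : Int) - pvCnt s init)) := by
  induction init using List.reverseRecOn generalizing suffix limit with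
  | nil =>
    have h0 : pvCnt s ([] : List Int) = 0 := rfl
    rw [if_neg (by simp only [List.length_nil, Nat.cast_zero] at hq ⊢; omega)]
    rw [PySem.List.pyRange_neg_one_eq_nil (by simp)]
    simp [pvAInner, pvKL, pvCnt]
  | append_singleton ys x ih =>
    have hlen : ((ys ++ [x]).length : Int) = (ys.length : Int) + 1 := by simp
    rw [hlen]
    have hrange : PySem.List.pyRange ((ys.length : Int) + 1 - 1) (-1) (-1) =
        (ys.length : Int) :: PySem.List.pyRange ((ys.length : Int) - 1) (-1) (-1) := by
      have : ((ys.length : Int) + 1 - 1) = (ys.length : Int) := by ring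
      rw [this, PySem.List.pyRange_neg_one_cons (by omega)]
    rw [hrange]
    have hassoc : (ys ++ [x]) ++ suffix = ys ++ x :: suffix := by simp
    rw [hassoc]
    simp only [pvAInner, PySem.List.pyGet?_append_length, Option.getD_some]
    by_cases hx : x = s
    · rw [if_pos hx]
      have hpop : PySem.List.pop? (ys ++ x :: suffix) ((ys.length : Int)) =
          some ((ys ++ x :: suffix)[ys.length]'(by simp), (ys ++ x :: suffix).eraseIdx ys.length) :=
        PySem.List.pop?_natCast _ _ (by simp)
      rw [hpop]
      simp only [Option.map_some, Option.getD_some, pvErase_mid]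
      by_cases hlim : (ys.length : Int) + 1 + (suffix.length : Int) - 1 ≤ limit
      · rw [if_pos hlim]
        rw [pvCnt_append_single, if_pos hx]
        have h1 : (ys.length : Int) + 1 + (suffix.length : Int) - limit ≤ pvCnt s ys + 1 := by
          have := pvCnt_nonneg s ys; omega
        have hq1 : (ys.length : Int) + 1 + (suffix.length : Int) - limit = 1 := by omega
        rw [if_pos h1, hq1]
        have he : pvCnt s ys + 1 - 1 = pvCnt s ys := by ring
        have h2 : ¬ pvCnt s ys < pvCnt s ys := by omega
        rw [he, pvKL_append_single, if_pos hx, if_neg h2, pvKL_id s _ ys (le_refl _)]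
      · rw [if_neg hlim]
        have hq' : 1 ≤ (ys.length : Int) + (suffix.length : Int) - limit := by omega
        have harg : (ys.length : Int) + 1 + (suffix.length : Int) - 1 =
            (ys.length : Int) + (suffix.length : Int) := by ring
        rw [harg, ih limit suffix hq']
        rw [pvCnt_append_single, if_pos hx]
        by_cases hc : (ys.length : Int) + (suffix.length : Int) - limit ≤ pvCnt s ys
        · have h1 : (ys.length : Int) + 1 + (suffix.length : Int) - limit ≤ pvCnt s ys + 1 := by omega
          have h2 : ¬ pvCnt s ys < pvCnt s ys + 1 - ((ys.length : Int) + 1 + (suffix.length : Int) - limit) := by omega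
          rw [if_pos hc, if_pos h1, pvKL_append_single, if_pos hx, if_neg h2]
          have hm : pvCnt s ys + 1 - ((ys.length : Int) + 1 + (suffix.length : Int) - limit) =
              pvCnt s ys - ((ys.length : Int) + (suffix.length : Int) - limit) := by ring
          rw [hm]
        · have h1 : ¬ (ys.length : Int) + 1 + (suffix.length : Int) - limit ≤ pvCnt s ys + 1 := by omega
          have h2 : ¬ pvCnt s ys < (0:Int) := by have := pvCnt_nonneg s ys; omega
          rw [if_neg hc, if_neg h1]
          rw [pvKL_append_single, if_pos hx, if_neg h2]
          have hm : (ys.length : Int) + 1 + (suffix.length : Int) - (pvCnt s ys + 1) =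
              (ys.length : Int) + (suffix.length : Int) - pvCnt s ys := by ring
          rw [hm]
    · rw [if_neg hx]
      have hq' : 1 ≤ (ys.length : Int) + ((x :: suffix).length : Int) - limit := by simp; omega
      have harg : (ys.length : Int) + 1 + (suffix.length : Int) =
          (ys.length : Int) + ((x :: suffix).length : Int) := by simp; ring
      rw [harg, ih limit (x :: suffix) hq']
      rw [pvCnt_append_single, if_neg hx, add_zero]
      have hlc : ((x :: suffix).length : Int) = (suffix.length : Int) + 1 := by simp
      rw [hlc]
      by_cases hc : (ys.length : Int) + ((suffix.length : Int) + 1) - limit ≤ pvCnt s ys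
      · rw [if_pos hc, if_pos hc]
        rw [pvKL_append_single, if_neg hx, List.append_assoc, List.singleton_append]
      · rw [if_neg hc, if_neg hc]
        rw [pvKL_append_single, if_neg hx, List.append_assoc, List.singleton_append]

lemma pvInner_bridge' (s limit : Int) (lst : List Int) (hq : 1 ≤ (lst.length : Int) - limit) :
    pvAInner s limit (PySem.List.pyRange ((lst.length : Int) - 1) (-1) (-1)) lst (lst.length : Int) =
      (if (lst.length : Int) - limit ≤ pvCnt s lst then
        Sum.inr (pvKL s (pvCnt s lst - ((lst.length : Int) - limit)) lst)
      else Sum.inl (pvKL s 0 lst, (lst.length : Int) - pvCnt s lst)) := by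
  have h := pvInner_bridge s limit lst [] (by simpa using hq)
  simpa using h

lemma pvGK_full (rest : List Int) (k : Int → Int) (l : List Int)
    (hfull : ∀ w ∈ rest, k w = pvCnt w l) (u : Int) :
    pvGK rest 0 k l u = k u := by
  induction rest generalizing k with
  | nil => rfl
  | cons w ws ih =>
    simp only [pvGK]
    rw [if_neg (by have := pvCnt_nonneg w l; omega : ¬ pvCnt w l < 0)]
    have h1 : (0 : Int) - 0 = 0 := by ring
    have h2 : pvCnt w l - 0 = pvCnt w l := by ring
    rw [h1, h2]
    rw [ih _ (fun w' hw' => by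
      simp only [pvUpd]
      split_ifs with he
      · rw [he]
      · exact hfull w' (List.mem_cons_of_mem _ hw'))]
    simp only [pvUpd]
    split_ifs with he
    · rw [he, hfull w (List.mem_cons_self)]
    · rfl

lemma pvMain (vals : List Int) (k : Int → Int) (l : List Int) (limit : Int)
    (hnd : vals.Nodup) (hdig : ∀ v ∈ vals, 0 ≤ v ∧ v ≤ 9)
    (hfull : ∀ v ∈ vals, k v = pvCnt v l)
    (hq : 1 ≤ ((pvMK k l).length : Int) - limit) :
    pvAOuter limit vals (pvMK k l) ((pvMK k l).length : Int) =
      pvMK (pvGK vals (((pvMK k l).length : Int) - limit) k l) l := by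
  induction vals generalizing k with
  | nil => rfl
  | cons v rest ih =>
    have hkv : k v = pvCnt v l := hfull v (List.mem_cons_self)
    have hdv : 0 ≤ v ∧ v ≤ 9 := hdig v (List.mem_cons_self)
    have hcL : pvCnt v (pvMK k l) = pvCnt v l := pvMK_count_full k v l (le_of_eq hkv.symm)
    simp only [pvAOuter]
    rw [pvInner_bridge' v limit (pvMK k l) hq]
    by_cases hc : ((pvMK k l).length : Int) - limit ≤ pvCnt v (pvMK k l)
    · rw [if_pos hc]
      simp only [pvGK]
      rw [if_neg (by rw [hcL] at hc; omega : ¬ pvCnt v l < ((pvMK k l).length : Int) - limit)]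
      have hs : ((pvMK k l).length : Int) - limit - (((pvMK k l).length : Int) - limit) = 0 := by ring
      rw [hs]
      rw [pvMK_congr (pvGK rest 0 (pvUpd k v (pvCnt v l - (((pvMK k l).length : Int) - limit))) l) _ l
        (fun w h1 h2 => pvGK_full rest _ l (fun w' hw' => by
          simp only [pvUpd]
          split_ifs with he
          · exact absurd (he ▸ hw') (List.Nodup.notMem hnd)
          · exact hfull w' (List.mem_cons_of_mem _ hw')) w)]
      rw [← pvLK k v _ l hdv (le_of_eq hkv.symm), hcL]
    · rw [if_neg hc]
      have hkl := pvLK k v 0 l hdv (le_of_eq hkv.symm)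
      have hlen : ((pvMK (pvUpd k v 0) l).length : Int) =
          ((pvMK k l).length : Int) - pvCnt v (pvMK k l) := by
        rw [← hkl, pvKL_zero_length]
      rw [hkl, hlen.symm]
      show pvAOuter limit rest (pvMK (pvUpd k v 0) l) ((pvMK (pvUpd k v 0) l).length : Int) =
        pvMK (pvGK (v :: rest) (((pvMK k l).length : Int) - limit) k l) l
      rw [ih (pvUpd k v 0) (List.Nodup.of_cons hnd)
        (fun w hw => hdig w (List.mem_cons_of_mem _ hw))
        (fun w hw => by
          have hne : ¬ w = v := by
            intro he
            exact (List.Nodup.notMem hnd) (he ▸ hw)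
          simp only [pvUpd]
          rw [if_neg hne]
          exact hfull w (List.mem_cons_of_mem _ hw))
        (by rw [hlen, hcL]; rw [hcL] at hc; omega)]
      simp only [pvGK]
      rw [if_pos (by rw [hcL] at hc; omega : pvCnt v l < ((pvMK k l).length : Int) - limit)]
      refine pvMK_congr _ _ l (fun w h1 h2 => ?_)
      have he1 : pvCnt v l - pvCnt v l = (0:Int) := by ring
      have he2 : ((pvMK (pvUpd k v 0) l).length : Int) - limit =
          ((pvMK k l).length : Int) - limit - pvCnt v l := by
        rw [hlen, hcL]; ring
      rw [he1, he2]

lemma pvBKeep_spec (vals : List Int) (need : Int) (k : Int → Int) (acc l : List Int)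
    (hnd : vals.Nodup) :
    pvBKeep need (vals.map (fun v => pvCnt v l)) acc =
      acc ++ vals.map (pvGK vals need k l) := by
  induction vals generalizing need k acc with
  | nil => simp [pvBKeep]
  | cons v rest ih =>
    simp only [List.map_cons, pvBKeep, pvGK]
    rw [ih (need - (if pvCnt v l < need then pvCnt v l else need))
      (pvUpd k v (pvCnt v l - (if pvCnt v l < need then pvCnt v l else need)))
      _ (List.Nodup.of_cons hnd)]
    rw [List.append_assoc, List.singleton_append]
    congr 1
    rw [pvGK_ne rest _ _ l v (List.Nodup.notMem hnd)]
    simp [pvUpd]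

lemma pvBPass_spec (keep xs out : List Int) (hlen : keep.length = 10) :
    pvBPass keep xs out = out ++ pvMK (fun w => PySem.List.pyGetD keep w 0) xs := by
  induction xs generalizing keep out with
  | nil => simp [pvBPass, pvMK]
  | cons x rest ih =>
    by_cases hd : 0 ≤ x ∧ x ≤ 9
    · have hxn : ((x.toNat : Nat) : Int) = x := Int.toNat_of_nonneg hd.1
      have hbound : x.toNat < keep.length := by omega
      by_cases hg : 0 < PySem.List.pyGetD keep x 0
      · simp only [pvBPass, if_pos hd, if_pos hg, pvMK, if_pos hd, if_pos hg]
        rw [ih (PySem.List.pySetD keep x (PySem.List.pyGetD keep x 0 - 1)) (out ++ [x])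
          (by rw [← hxn, PySem.List.pySetD_natCast, List.length_set, hlen])]
        rw [List.append_assoc, List.singleton_append]
        congr 1
        refine congrArg (x :: ·) (pvMK_congr _ _ _ (fun w h1 h2 => ?_))
        have hwn : ((w.toNat : Nat) : Int) = w := Int.toNat_of_nonneg h1
        rw [← hxn, ← hwn, PySem.List.pyGetD_pySetD_natCast _ _ _ _ _ hbound]
        by_cases hwx : w.toNat = x.toNat
        · simp [pvUpd, hwx]
        · simp [pvUpd, hwx, Int.natCast_inj]
          intro he
          exfalso
          apply hwx
          omega
      · simp only [pvBPass, if_pos hd, if_pos hg, pvMK, if_neg hg]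
        exact ih keep out hlen
    · simp only [pvBPass, if_neg hd, pvMK, if_neg hd]
      rw [ih keep (out ++ [x]) hlen, List.append_assoc, List.singleton_append]

lemma pvInner_limit_eq (s limit L' : Int) (positions lst : List Int) (L : Int)
    (h1 : L - 1 ≤ limit) (h2 : L - 1 ≤ L') :
    pvAInner s limit positions lst L = pvAInner s L' positions lst L := by
  induction positions with
  | nil => rfl
  | cons p rest ih =>
    simp only [pvAInner]
    by_cases hn : ((PySem.List.pyGet? lst p).getD 0) = s
    · rw [if_pos hn, if_pos hn, if_pos (by omega : L - 1 ≤ limit), if_pos (by omega : L - 1 ≤ L')]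
    · rw [if_neg hn, if_neg hn, ih]

lemma pvInner_top (s limit : Int) (positions lst : List Int) (L : Int)
    (h1 : L - 1 ≤ limit) :
    pvAInner s limit positions lst L = Sum.inl (lst, L) ∨
      ∃ r, pvAInner s limit positions lst L = Sum.inr r := by
  induction positions with
  | nil => exact Or.inl rfl
  | cons p rest ih =>
    simp only [pvAInner]
    by_cases hn : ((PySem.List.pyGet? lst p).getD 0) = s
    · rw [if_pos hn, if_pos (by omega : L - 1 ≤ limit)]
      exact Or.inr ⟨_, rfl⟩
    · rw [if_neg hn]
      exact ih

lemma pvOuter_limit_eq (vals : List Int) (lst : List Int) (limit L' : Int)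
    (h1 : (lst.length : Int) - 1 ≤ limit) (h2 : (lst.length : Int) - 1 ≤ L') :
    pvAOuter limit vals lst (lst.length : Int) = pvAOuter L' vals lst (lst.length : Int) := by
  induction vals with
  | nil => rfl
  | cons v rest ih =>
    simp only [pvAOuter]
    rw [← pvInner_limit_eq v limit L' _ lst ((lst.length : Int)) h1 h2]
    rcases pvInner_top v limit _ lst ((lst.length : Int)) h1 with hinl | ⟨r, hinr⟩
    · rw [hinl]
      exact ih
    · rw [hinr]

lemma pvBval (numbers : List Int) (need : Int) :
    pvBPass (pvBKeep need
        ((PySem.List.pyRange 0 10 1).map (fun v => (PySem.List.count numbers v : Int))) [])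
      numbers [] =
    pvMK (pvGK (PySem.List.pyRange 0 10 1) need (fun v => pvCnt v numbers) numbers) numbers := by
  have hnd : (PySem.List.pyRange 0 10 1).Nodup := PySem.List.nodup_pyRange_one 0 10
  have hcounts : (PySem.List.pyRange 0 10 1).map (fun v => (PySem.List.count numbers v : Int)) =
      (PySem.List.pyRange 0 10 1).map (fun v => pvCnt v numbers) := by
    refine List.map_congr_left (fun v _ => ?_)
    simp [PySem.List.count_eq, pvCnt]
  have hkeep := pvBKeep_spec (PySem.List.pyRange 0 10 1) need
    (fun v => pvCnt v numbers) [] numbers hnd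
  rw [List.nil_append] at hkeep
  have hkeeplen : ((PySem.List.pyRange 0 10 1).map
      (pvGK (PySem.List.pyRange 0 10 1) need (fun v => pvCnt v numbers) numbers)).length = 10 := by
    rw [List.length_map, PySem.List.length_pyRange_one]
    rfl
  rw [hcounts, hkeep, pvBPass_spec _ _ _ hkeeplen, List.nil_append]
  refine pvMK_congr _ _ numbers (fun w hw1 hw2 => ?_)
  rw [PySem.List.pyGetD_map_pyRange_of_nonneg _ 10 w 0 hw1 (by omega)]

lemma pvAB (numbers : List Int) (limit : Int) :
    remove_lowest_number numbers limit = remove_lowest_number_alt numbers limit := by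
  have hnd : (PySem.List.pyRange 0 10 1).Nodup := PySem.List.nodup_pyRange_one 0 10
  have hdig : ∀ v ∈ PySem.List.pyRange 0 10 1, 0 ≤ v ∧ v ≤ 9 := fun v hv => by
    have := PySem.List.mem_pyRange_one.mp hv; omega
  have hid : pvMK (fun v => pvCnt v numbers) numbers = numbers :=
    pvMK_id _ _ (fun x _ _ _ => le_refl _)
  by_cases hq : 1 ≤ (numbers.length : Int) - limit
  · have hmain := pvMain (PySem.List.pyRange 0 10 1) (fun v => pvCnt v numbers) numbers limit
      hnd hdig (fun v _ => rfl) (by rw [hid]; exact hq)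
    rw [hid] at hmain
    have hA : remove_lowest_number numbers limit =
        pvMK (pvGK (PySem.List.pyRange 0 10 1) ((numbers.length : Int) - limit)
          (fun v => pvCnt v numbers) numbers) numbers := hmain
    have hB : remove_lowest_number_alt numbers limit =
        pvBPass (pvBKeep ((numbers.length : Int) - limit)
          ((PySem.List.pyRange 0 10 1).map (fun v => (PySem.List.count numbers v : Int))) [])
          numbers [] := by
      show pvBPass (pvBKeep (if (numbers.length : Int) - limit < 1 then 1
          else (numbers.length : Int) - limit) _ []) numbers [] = _
      rw [if_neg (by omega)]
    rw [hA, hB, pvBval]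
  · have hA1 : remove_lowest_number numbers limit =
        pvAOuter ((numbers.length : Int) - 1) (PySem.List.pyRange 0 10 1) numbers
          ((numbers.length : Int)) :=
      pvOuter_limit_eq _ numbers limit ((numbers.length : Int) - 1) (by omega) (by omega)
    have hmain := pvMain (PySem.List.pyRange 0 10 1) (fun v => pvCnt v numbers) numbers
      ((numbers.length : Int) - 1) hnd hdig (fun v _ => rfl) (by rw [hid]; omega)
    rw [hid] at hmain
    have he : (numbers.length : Int) - ((numbers.length : Int) - 1) = 1 := by ring
    rw [he] at hmain
    have hB : remove_lowest_number_alt numbers limit =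
        pvBPass (pvBKeep 1
          ((PySem.List.pyRange 0 10 1).map (fun v => (PySem.List.count numbers v : Int))) [])
          numbers [] := by
      show pvBPass (pvBKeep (if (numbers.length : Int) - limit < 1 then 1
          else (numbers.length : Int) - limit) _ []) numbers [] = _
      rw [if_pos (by omega)]
    rw [hA1, hmain, hB, pvBval]

-- ===== VERDICT (by name: the statement is the Claim_ definition above) =====
theorem remove_lowest_number_spec : Claim_equal_remove_lowest_number := by
  intro numbers limit _
  exact pvAB numbers limit
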